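-- pv_equiv track=rewrite | github.com/TiepiNL/ECA | temperature.py | get_unique_years
-- ===== SOURCE A (Python) =====
-- def get_unique_years(list_of_dates):
--     ''' (list of str) -> list of str
--
--     >>> dates = ['19010107', '19010108', '19010109', '19050109', '20000109']
--     >>> get_unique_years(dates)
--     ['1901', '1905', '2000']
--     '''
--     years = []
--     for date in list_of_dates:
--         year = date[:4]
--         if year not in years:
--             years.append(year)
--             years.sort()
--     return years
-- ===== SOURCE B (Python) =====
-- def get_unique_years(list_of_dates):
--     result = []
--     for year in sorted(date[:4] for date in list_of_dates):
--         if not result or result[-1] != year: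
--             result.append(year)
--     return result
-- ===== Notes on version B (the rewrite author's own statement) =====
-- stated objective: faster
-- what changed: Replaces A's per-element membership scan and re-sort of the accumulator with one upfront sort of all year prefixes followed by a single adjacent-deduplication pass.
import Mathlib
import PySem

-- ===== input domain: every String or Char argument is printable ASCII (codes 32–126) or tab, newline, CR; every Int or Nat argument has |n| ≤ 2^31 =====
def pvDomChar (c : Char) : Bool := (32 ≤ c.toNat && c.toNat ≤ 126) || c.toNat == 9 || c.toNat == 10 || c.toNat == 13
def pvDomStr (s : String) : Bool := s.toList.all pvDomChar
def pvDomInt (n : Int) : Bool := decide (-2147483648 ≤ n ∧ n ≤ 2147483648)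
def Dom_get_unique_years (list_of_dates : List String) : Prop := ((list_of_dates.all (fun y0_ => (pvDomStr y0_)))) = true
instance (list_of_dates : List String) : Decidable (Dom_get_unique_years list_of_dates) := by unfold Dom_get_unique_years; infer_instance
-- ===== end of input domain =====

-- B sorts all year prefixes once and removes adjacent duplicates in one pass,
-- instead of A's per-element membership scan plus re-sort of the accumulator (faster in a timing run).

-- ===== PORT A =====
def get_unique_years (list_of_dates : List String) : List String :=
  list_of_dates.foldl (fun years date =>
    let year := PySem.Str.slice date none (some 4)
    if year ∈ years then years
    else PySem.List.sorted (years ++ [year]) (fun x => x) false) []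

-- ===== PORT B =====
def get_unique_years_alt (list_of_dates : List String) : List String :=
  (PySem.List.sorted (list_of_dates.map (fun date => PySem.Str.slice date none (some 4)))
      (fun x => x) false).foldl
    (fun result year =>
      if result = [] ∨ result.getLast? ≠ some year then result ++ [year] else result) []

-- ===== PRECONDITION & SPEC =====
def Spec_get_unique_years (list_of_dates : List String) (out : List String) : Prop := out = get_unique_years_alt list_of_dates
instance (list_of_dates : List String) (out : List String) : Decidable (Spec_get_unique_years list_of_dates out) := by unfold Spec_get_unique_years; infer_instance

-- ===== CLAIM (what is proved, stated in full; the proofs are below) =====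
def Claim_equal_get_unique_years : Prop := ∀ (list_of_dates : List String), Dom_get_unique_years list_of_dates → Spec_get_unique_years list_of_dates (get_unique_years list_of_dates)

-- ===== LEMMAS AND PROOFS =====

-- proof-only abbreviations for the two fold steps and the prefix map
def pvPre (date : String) : String := PySem.Str.slice date none (some 4)

def pvStepA (years : List String) (date : String) : List String :=
  if pvPre date ∈ years then years
  else PySem.List.sorted (years ++ [pvPre date]) (fun x => x) false

def pvStepB (result : List String) (year : String) : List String :=
  if result = [] ∨ result.getLast? ≠ some year then result ++ [year] else result

theorem pv_A_eq (xs : List String) : get_unique_years xs = xs.foldl pvStepA [] := rfl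

theorem pv_B_eq (xs : List String) :
    get_unique_years_alt xs =
      (PySem.List.sorted (xs.map pvPre) (fun x => x) false).foldl pvStepB [] := rfl

-- Every element of a ≤-sorted list is at most its last element.
theorem pv_le_getLast : ∀ (l : List String), l.Pairwise (· ≤ ·) →
    ∀ (last : String), l.getLast? = some last → ∀ x ∈ l, x ≤ last := by
  intro l
  induction l with
  | nil => intro _ last h; simp at h
  | cons a t ih =>
    intro hp last hl x hm
    cases t with
    | nil =>
      simp at hm hl; subst hm; simp [hl]
    | cons b t' =>
      have hl' : (b :: t').getLast? = some last := by simpa using hl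
      rcases List.mem_cons.mp hm with rfl | hm'
      · have hab : x ≤ b := (List.pairwise_cons.mp hp).1 b (by simp)
        exact le_trans hab (ih (List.pairwise_cons.mp hp).2 last hl' b (by simp))
      · exact ih (List.pairwise_cons.mp hp).2 last hl' x hm'

-- Invariant for A's fold: the accumulator stays strictly increasing and holds
-- exactly the year prefixes seen so far (plus the initial accumulator).
theorem pv_A_inv (l : List String) (acc : List String) (hp : acc.Pairwise (· < ·)) :
    (l.foldl pvStepA acc).Pairwise (· < ·) ∧
    (∀ x, x ∈ l.foldl pvStepA acc ↔ x ∈ acc ∨ x ∈ l.map pvPre) := by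
  induction l generalizing acc with
  | nil => simpa using hp
  | cons d t ih =>
    simp only [List.foldl_cons, List.map_cons]
    by_cases hmem : pvPre d ∈ acc
    · rw [show pvStepA acc d = acc from by simp [pvStepA, hmem]]
      obtain ⟨h1, h2⟩ := ih acc hp
      refine ⟨h1, fun x => ?_⟩
      rw [h2, List.mem_cons]
      constructor
      · tauto
      · rintro (h | rfl | h) <;> tauto
    · rw [show pvStepA acc d = PySem.List.sorted (acc ++ [pvPre d]) (fun x => x) false from
        by simp [pvStepA, hmem]]
      have hnodup : (acc ++ [pvPre d]).Nodup := by
        refine List.Nodup.append (hp.imp ne_of_lt) (by simp) ?_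
        intro a ha hb
        simp at hb
        exact hmem (hb ▸ ha)
      have hperm : (PySem.List.sorted (acc ++ [pvPre d]) (fun x => x) false).Perm
          (acc ++ [pvPre d]) := PySem.List.sorted_perm _ _ _
      have hple : (PySem.List.sorted (acc ++ [pvPre d]) (fun x => x) false).Pairwise (· ≤ ·) := by
        simpa using PySem.List.sorted_pairwise (xs := acc ++ [pvPre d]) (key := fun x => x)
      have hnd : (PySem.List.sorted (acc ++ [pvPre d]) (fun x => x) false).Nodup :=
        hperm.nodup_iff.mpr hnodup
      have hplt : (PySem.List.sorted (acc ++ [pvPre d]) (fun x => x) false).Pairwise (· < ·) :=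
        (List.Pairwise.and hple hnd).imp (fun ⟨hle, hne⟩ => lt_of_le_of_ne hle hne)
      obtain ⟨h1, h2⟩ := ih _ hplt
      refine ⟨h1, fun x => ?_⟩
      rw [h2, List.mem_cons]
      have hms : x ∈ PySem.List.sorted (acc ++ [pvPre d]) (fun x => x) false ↔
          x ∈ acc ∨ x = pvPre d := by
        rw [PySem.List.mem_sorted]; simp
      rw [hms]
      tauto

-- Invariant for B's fold: adjacent dedup of a ≤-sorted remainder, appended after a
-- strictly increasing accumulator all of whose elements are ≤ the remainder.
theorem pv_B_inv (rest : List String) (acc : List String)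
    (hr : rest.Pairwise (· ≤ ·)) (hp : acc.Pairwise (· < ·))
    (hle : ∀ a ∈ acc, ∀ r ∈ rest, a ≤ r) :
    (rest.foldl pvStepB acc).Pairwise (· < ·) ∧
    (∀ x, x ∈ rest.foldl pvStepB acc ↔ x ∈ acc ∨ x ∈ rest) := by
  induction rest generalizing acc with
  | nil => simpa using hp
  | cons r t ih =>
    simp only [List.foldl_cons]
    have hrt : t.Pairwise (· ≤ ·) := (List.pairwise_cons.mp hr).2
    have hrle : ∀ x ∈ t, r ≤ x := (List.pairwise_cons.mp hr).1
    by_cases hguard : acc = [] ∨ acc.getLast? ≠ some r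
    · rw [show pvStepB acc r = acc ++ [r] from by simp [pvStepB, hguard]]
      have hlt : ∀ a ∈ acc, a < r := by
        intro a ha
        have hale : a ≤ r := hle a ha r (by simp)
        rcases lt_or_eq_of_le hale with h | rfl
        · exact h
        · exfalso
          have hne : acc ≠ [] := by intro h; rw [h] at ha; cases ha
          obtain ⟨last, hlast⟩ := Option.isSome_iff_exists.mp (List.getLast?_isSome.mpr hne)
          have hlin : last ∈ acc := List.mem_of_getLast? hlast
          have h1 : last ≤ a := hle last hlin a (by simp)
          have h2 : a ≤ last := pv_le_getLast acc (hp.imp le_of_lt) last hlast a ha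
          have heq : last = a := le_antisymm h1 h2
          rcases hguard with h | h
          · exact hne h
          · exact h (heq ▸ hlast)
      have hp' : (acc ++ [r]).Pairwise (· < ·) := by
        rw [List.pairwise_append]
        exact ⟨hp, by simp, by simpa using hlt⟩
      have hle' : ∀ a ∈ acc ++ [r], ∀ x ∈ t, a ≤ x := by
        intro a ha x hx
        rcases List.mem_append.mp ha with h | h
        · exact hle a h x (by simp [hx])
        · simp at h; subst h; exact hrle x hx
      obtain ⟨h1, h2⟩ := ih _ hrt hp' hle'
      refine ⟨h1, fun x => ?_⟩
      rw [h2]; simp; tauto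
    · rw [show pvStepB acc r = acc from by simp [pvStepB, hguard]]
      simp only [not_or, not_not] at hguard
      obtain ⟨hne, hlast⟩ := hguard
      have hrin : r ∈ acc := List.mem_of_getLast? hlast
      obtain ⟨h1, h2⟩ := ih _ hrt hp (fun a ha x hx => hle a ha x (by simp [hx]))
      refine ⟨h1, fun x => ?_⟩
      rw [h2, List.mem_cons]
      constructor
      · tauto
      · rintro (h | rfl | h) <;> tauto

-- ===== VERDICT (by name: the statement is the Claim_ definition above) =====
theorem get_unique_years_spec : Claim_equal_get_unique_years := by
  intro xs _
  unfold Spec_get_unique_years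
  rw [pv_A_eq, pv_B_eq]
  obtain ⟨hA1, hA2⟩ := pv_A_inv xs [] (by simp)
  have hsr : (PySem.List.sorted (xs.map pvPre) (fun x => x) false).Pairwise (· ≤ ·) := by
    simpa using PySem.List.sorted_pairwise (xs := xs.map pvPre) (key := fun x => x)
  obtain ⟨hB1, hB2⟩ := pv_B_inv _ [] hsr (by simp) (by simp)
  have hmemeq : ∀ x, x ∈ xs.foldl pvStepA [] ↔
      x ∈ (PySem.List.sorted (xs.map pvPre) (fun x => x) false).foldl pvStepB [] := by
    intro x
    simp [hA2, hB2, PySem.List.mem_sorted]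
  have hperm := (List.perm_ext_iff_of_nodup (hA1.imp ne_of_lt) (hB1.imp ne_of_lt)).mpr hmemeq
  exact List.Perm.eq_of_pairwise' (hA1.imp le_of_lt) (hB1.imp le_of_lt) hperm
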